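-- pv_equiv track=rewrite | github.com/lu-kog/ZCoders.io | src/com/code/python/Dragon_king/Dragon_king.py | flames
-- ===== SOURCE A (Python) =====
-- def flames(name1, name2):
--     # Convert names to lowercase and remove spaces
--     name1 = name1.lower().replace(" ", "")
--     name2 = name2.lower().replace(" ", "")
--     for char in name1:
--         if char in name2:
--             name1 = name1.replace(char, "", 1)
--             name2 = name2.replace(char, "", 1)
--
--     count = len(name1) + len(name2)
--
--     sequence = "flames"
--
--     # Eliminate letters from the sequence based on the count
--     while len(sequence) > 1:
--         index = (count % len(sequence)) - 1
--         if index >= 0: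
--             sequence = sequence[:index] + sequence[index+1:]
--         else:
--             sequence = sequence[:len(sequence)-1]
--
--     # Map the final letter to the status
--     status_map = {
--         'f': 'Friendship',
--         'l': 'Love',
--         'a': 'Affection',
--         'm': 'Marriage',
--         'e': 'Enemy',
--         's': 'Sibling'
--     }
--
--     # Return the status
--     return status_map[sequence]
-- ===== SOURCE B (Python) =====
-- def flames(name1, name2):
--     # Convert names to lowercase and remove spaces
--     s1 = name1.lower().replace(" ", "")
--     s2 = name2.lower().replace(" ", "")
--     # One linear pass per name: signed character frequencies; the letters
--     # surviving A's pairwise cancellation number sum(|delta|).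
--     freq = {}
--     for c in s1:
--         freq[c] = freq.get(c, 0) + 1
--     for c in s2:
--         freq[c] = freq.get(c, 0) - 1
--     count = sum(abs(v) for v in freq.values())
--     # Josephus-style backward recurrence: instead of mutating the sequence,
--     # track the survivor's index in the original "flames".  Deleting position
--     # (count-1) % n from a list of length n shifts the survivor's original
--     # index up by one exactly when it is >= the deleted position.
--     idx = 0
--     for n in range(2, 7):
--         if idx >= (count - 1) % n:
--             idx += 1
--     return ("Friendship", "Love", "Affection", "Marriage", "Enemy", "Sibling")[idx]
-- ===== Notes on version B (the rewrite author's own statement) =====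
-- stated objective: faster
-- what changed: Replaces A's O(n*m) per-letter cancellation (substring test plus replace for every character) by one signed frequency dictionary built in a single pass per name with count = sum of |deltas|, and replaces A's list-mutating elimination loop by a Josephus-style index recurrence that never touches the sequence, finishing with a tuple lookup instead of a dict.
import Mathlib
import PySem

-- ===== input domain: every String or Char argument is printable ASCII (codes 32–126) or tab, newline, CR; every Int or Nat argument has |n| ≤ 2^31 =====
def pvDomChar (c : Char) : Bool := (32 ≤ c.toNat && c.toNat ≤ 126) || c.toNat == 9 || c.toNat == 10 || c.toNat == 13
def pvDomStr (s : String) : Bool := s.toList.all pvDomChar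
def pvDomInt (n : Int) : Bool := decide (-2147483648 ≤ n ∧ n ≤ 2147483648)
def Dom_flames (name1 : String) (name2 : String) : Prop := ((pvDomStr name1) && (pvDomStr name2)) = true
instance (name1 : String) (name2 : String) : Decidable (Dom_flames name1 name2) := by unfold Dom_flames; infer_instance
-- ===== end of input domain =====

-- B replaces A's O(n*m) one-letter-at-a-time cancellation by a signed
-- frequency dictionary (count = sum of |deltas|) and A's list-mutating
-- elimination loop by a Josephus-style survivor-index recurrence.

-- ===== PORT A =====

-- A's status map
def statusMap : PySem.Dict String String :=
  PySem.Dict.ofList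
    [("f", "Friendship"), ("l", "Love"), ("a", "Affection"),
     ("m", "Marriage"), ("e", "Enemy"), ("s", "Sibling")]

-- A's while loop: index = count % len - 1; the slices are at in-range bounds
-- (0 ≤ index < len in the then-branch, sequence[:len-1] in the else-branch),
-- where Python slicing is exactly take/drop.  Each pass removes one letter,
-- so fuel = len(sequence) passes suffice; the fuel only makes the recursion
-- structural, it never changes the computation.
def flamesElimGo (count : Int) : Nat → List Char → List Char
  | 0, seq => seq
  | fuel + 1, seq =>
    if 1 < seq.length then
      let index : Int := PySem.Int.mod count (seq.length : Int) - 1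
      if 0 ≤ index then
        flamesElimGo count fuel (seq.take index.toNat ++ seq.drop (index.toNat + 1))
      else
        flamesElimGo count fuel (seq.take (seq.length - 1))
    else seq

def flamesElim (count : Int) (seq : List Char) : List Char :=
  flamesElimGo count seq.length seq

-- A: cancel one shared occurrence per character of the (frozen) first name,
-- then eliminate through "flames".  `char in name2` on a 1-char needle is
-- PySem.Chars.isIn [ch]; `name.replace(char, "", 1)` (drop the first
-- occurrence, a no-op when absent) is exactly List.erase.
-- status_map[sequence] never misses (the result is always a flames letter),
-- ported as getD with an unreachable default.
def flames (name1 : String) (name2 : String) : String :=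
  let n1 := PySem.Chars.replace (PySem.Chars.lower name1.toList) [' '] []
  let n2 := PySem.Chars.replace (PySem.Chars.lower name2.toList) [' '] []
  let st := n1.foldl
    (fun (st : List Char × List Char) ch =>
      if PySem.Chars.isIn [ch] st.2 then (st.1.erase ch, st.2.erase ch) else st)
    (n1, n2)
  let count : Int := (st.1.length : Int) + (st.2.length : Int)
  let seq := flamesElim count ['f', 'l', 'a', 'm', 'e', 's']
  PySem.Dict.getD statusMap (String.mk seq) ""

-- ===== PORT B =====

-- B: freq[c] = freq.get(c, 0) ± 1 is Dict.modify c 0 (· ± 1); the sum of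
-- abs over freq.values() is order-independent, so iterating the dict's
-- values is exact.  The index recurrence is a fold over range(2, 7); the
-- final tuple lookup t[idx] (always in range) is pyGet? with an
-- unreachable default.
def flames_alt (name1 : String) (name2 : String) : String :=
  let s1 := PySem.Chars.replace (PySem.Chars.lower name1.toList) [' '] []
  let s2 := PySem.Chars.replace (PySem.Chars.lower name2.toList) [' '] []
  let freq : PySem.Dict Char Int :=
    s2.foldl (fun d c => d.modify c 0 (· - 1))
      (s1.foldl (fun d c => d.modify c 0 (· + 1)) (PySem.Dict.empty : PySem.Dict Char Int))
  let count : Int := ((PySem.Dict.values freq).map (fun v => |v|)).sum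
  let idx : Int := (PySem.List.pyRange 2 7 1).foldl
    (fun idx n => if PySem.Int.mod (count - 1) n ≤ idx then idx + 1 else idx) 0
  (PySem.List.pyGet?
    ["Friendship", "Love", "Affection", "Marriage", "Enemy", "Sibling"] idx).getD ""

-- ===== PRECONDITION & SPEC =====
def Spec_flames (name1 : String) (name2 : String) (out : String) : Prop := out = flames_alt name1 name2
instance (name1 : String) (name2 : String) (out : String) : Decidable (Spec_flames name1 name2 out) := by unfold Spec_flames; infer_instance

-- ===== CLAIM (what is proved, stated in full; the proofs are below) =====
def Claim_equal_flames : Prop := ∀ (name1 : String) (name2 : String), Dom_flames name1 name2 → Spec_flames name1 name2 (flames name1 name2)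

-- ===== LEMMAS AND PROOFS =====

-- A's cancellation step, named for the proofs
def cancelStep (st : List Char × List Char) (ch : Char) : List Char × List Char :=
  if PySem.Chars.isIn [ch] st.2 then (st.1.erase ch, st.2.erase ch) else st

lemma isIn_singleton (c : Char) (l : List Char) :
    PySem.Chars.isIn [c] l = true ↔ c ∈ l := by
  rw [PySem.Chars.isIn_iff_infix, List.singleton_infix_iff]

-- invariant of A's cancellation loop: per-character counts of both names
lemma fold_counts (rest : List Char) :
    ∀ n1 n2 : List Char, (∀ c, rest.count c ≤ n1.count c) →
    ∀ c, ((rest.foldl cancelStep (n1, n2)).1.count c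
            = n1.count c - min (rest.count c) (n2.count c))
       ∧ ((rest.foldl cancelStep (n1, n2)).2.count c
            = n2.count c - min (rest.count c) (n2.count c)) := by
  induction rest with
  | nil => intro n1 n2 _ c; simp
  | cons x r ih =>
    intro n1 n2 h c
    simp only [List.foldl_cons]
    by_cases hx : x ∈ n2
    · have hstep : cancelStep (n1, n2) x = (n1.erase x, n2.erase x) := by
        have : PySem.Chars.isIn [x] n2 = true := (isIn_singleton x n2).mpr hx
        simp [cancelStep, this]
      rw [hstep]
      have hx2 : 0 < n2.count x := List.count_pos_iff.mpr hx
      have hx1 : r.count x + 1 ≤ n1.count x := by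
        have := h x; rwa [List.count_cons_self] at this
      have hpre : ∀ c, r.count c ≤ (n1.erase x).count c := by
        intro c
        by_cases hcx : c = x
        · subst hcx; rw [List.count_erase_self]; omega
        · rw [List.count_erase_of_ne hcx]
          have := h c; rwa [List.count_cons_of_ne (Ne.symm hcx)] at this
      have H := ih (n1.erase x) (n2.erase x) hpre c
      by_cases hcx : c = x
      · subst hcx
        rw [List.count_erase_self, List.count_erase_self] at H
        rw [List.count_cons_self]
        omega
      · rw [List.count_erase_of_ne hcx, List.count_erase_of_ne hcx] at H
        rw [List.count_cons_of_ne (Ne.symm hcx)]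
        exact H
    · have hstep : cancelStep (n1, n2) x = (n1, n2) := by
        have : PySem.Chars.isIn [x] n2 = false := by
          rcases hb : PySem.Chars.isIn [x] n2 with _ | _
          · rfl
          · exact absurd ((isIn_singleton x n2).mp hb) hx
        simp [cancelStep, this]
      rw [hstep]
      have hx0 : n2.count x = 0 := by
        simpa [List.count_eq_zero] using hx
      have hpre : ∀ c, r.count c ≤ n1.count c := by
        intro c
        have h1 := h c
        by_cases hcx : c = x
        · subst hcx; rw [List.count_cons_self] at h1; omega
        · rwa [List.count_cons_of_ne (Ne.symm hcx)] at h1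
      have H := ih n1 n2 hpre c
      by_cases hcx : c = x
      · subst hcx; rw [List.count_cons_self]; omega
      · rw [List.count_cons_of_ne (Ne.symm hcx)]; exact H

-- the surviving-letter totals: A's after-cancellation length sum equals
-- the sum of absolute frequency differences over the distinct characters
lemma counts_eq (s1 s2 : List Char) :
    (((s1.foldl cancelStep (s1, s2)).1.length : Int)
      + ((s1.foldl cancelStep (s1, s2)).2.length : Int))
    = ((PySem.Set.ofList (s1 ++ s2)).map
        (fun c => |(s1.count c : Int) - (s2.count c : Int)|)).sum := by
  have H := fold_counts s1 s1 s2 (fun c => le_refl _)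
  set m1 := (s1.foldl cancelStep (s1, s2)).1 with hm1
  set m2 := (s1.foldl cancelStep (s1, s2)).2 with hm2
  set S : Finset Char := (s1 ++ s2).toFinset with hS
  have hsub1 : m1.toFinset ⊆ S := by
    intro a ha
    rw [List.mem_toFinset] at ha
    have hc : 0 < m1.count a := List.count_pos_iff.mpr ha
    rw [(H a).1] at hc
    have : 0 < s1.count a := by omega
    rw [hS, List.mem_toFinset, List.mem_append]
    exact Or.inl (List.count_pos_iff.mp this)
  have hsub2 : m2.toFinset ⊆ S := by
    intro a ha
    rw [List.mem_toFinset] at ha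
    have hc : 0 < m2.count a := List.count_pos_iff.mpr ha
    rw [(H a).2] at hc
    have : 0 < s2.count a := by omega
    rw [hS, List.mem_toFinset, List.mem_append]
    exact Or.inr (List.count_pos_iff.mp this)
  have hlen1 : m1.length = ∑ a ∈ S, m1.count a := by
    have base : ∑ a ∈ m1.toFinset, m1.count a = m1.length := by
      have := Multiset.toFinset_sum_count_eq (m1 : Multiset Char)
      simpa using this
    rw [← Finset.sum_subset hsub1 (by
      intro a _ ha
      rw [List.mem_toFinset] at ha
      exact List.count_eq_zero.mpr ha)]
    exact base.symm
  have hlen2 : m2.length = ∑ a ∈ S, m2.count a := by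
    have base : ∑ a ∈ m2.toFinset, m2.count a = m2.length := by
      have := Multiset.toFinset_sum_count_eq (m2 : Multiset Char)
      simpa using this
    rw [← Finset.sum_subset hsub2 (by
      intro a _ ha
      rw [List.mem_toFinset] at ha
      exact List.count_eq_zero.mpr ha)]
    exact base.symm
  have hsetS : (PySem.Set.ofList (s1 ++ s2)).toFinset = S := by
    apply Finset.ext
    intro a
    rw [List.mem_toFinset, PySem.Set.mem_ofList, hS, List.mem_toFinset]
  have hrhs : ((PySem.Set.ofList (s1 ++ s2)).map
        (fun c => |(s1.count c : Int) - (s2.count c : Int)|)).sum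
      = ∑ a ∈ S, |(s1.count a : Int) - (s2.count a : Int)| := by
    rw [← List.sum_toFinset _ (PySem.Set.nodup_ofList (s1 ++ s2)), hsetS]
  rw [hrhs, hlen1, hlen2]
  push_cast
  rw [← Finset.sum_add_distrib]
  apply Finset.sum_congr rfl
  intro a _
  have h1 := (H a).1
  have h2 := (H a).2
  rcases le_total (s1.count a) (s2.count a) with hle | hle
  · rw [abs_of_nonpos (by omega)]
    omega
  · rw [abs_of_nonneg (by omega)]
    omega

-- B's decrement loop, the (· - 1) twin of getD_foldl_modify_add_one
lemma getD_foldl_modify_sub_one (l : List Char) (d : PySem.Dict Char Int) (v : Char) :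
    (l.foldl (fun d x => d.modify x 0 (· - 1)) d).getD v 0
      = d.getD v 0 - (l.count v : Int) := by
  induction l generalizing d with
  | nil => simp
  | cons x xs ih =>
    simp only [List.foldl_cons]
    rw [ih]
    rw [PySem.Dict.getD_modify]
    by_cases hvx : v = x
    · subst hvx; rw [if_pos rfl, List.count_cons_self]; push_cast; ring
    · rw [if_neg hvx, List.count_cons_of_ne (Ne.symm hvx)]

-- B's dict after both passes: value at c is count s1 c - count s2 c
lemma getD_freq (s1 s2 : List Char) (v : Char) :
    ((s2.foldl (fun d c => d.modify c 0 (· - 1))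
        (s1.foldl (fun d c => d.modify c 0 (· + 1)) (PySem.Dict.empty : PySem.Dict Char Int))).getD v 0)
      = (s1.count v : Int) - (s2.count v : Int) := by
  rw [getD_foldl_modify_sub_one, PySem.Dict.getD_foldl_modify_add_one]
  simp

-- B's dict's key list is exactly the distinct characters of s1 ++ s2
lemma keys_freq (s1 s2 : List Char) :
    (s2.foldl (fun d c => d.modify c 0 (· - 1))
        (s1.foldl (fun d c => d.modify c 0 (· + 1)) (PySem.Dict.empty : PySem.Dict Char Int))).keys
      = PySem.Set.ofList (s1 ++ s2) := by
  rw [PySem.Dict.keys_foldl_modify, PySem.Dict.keys_foldl_modify]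
  rw [PySem.Dict.keys_empty, PySem.Set.update_nil_left, ← PySem.Set.ofList_append]

-- B's count expression equals the sum of absolute frequency differences
lemma countB_eq (s1 s2 : List Char) :
    (((s2.foldl (fun d c => d.modify c 0 (· - 1))
        (s1.foldl (fun d c => d.modify c 0 (· + 1)) (PySem.Dict.empty : PySem.Dict Char Int))).values).map
          (fun v => |v|)).sum
      = ((PySem.Set.ofList (s1 ++ s2)).map
          (fun c => |(s1.count c : Int) - (s2.count c : Int)|)).sum := by
  have hnd : (s2.foldl (fun d c => d.modify c 0 (· - 1))
      (s1.foldl (fun d c => d.modify c 0 (· + 1))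
        (PySem.Dict.empty : PySem.Dict Char Int))).keys.Nodup := by
    rw [keys_freq]; exact PySem.Set.nodup_ofList _
  rw [PySem.Dict.values_eq_map_keys _ hnd 0, keys_freq s1 s2, List.map_map]
  apply congrArg List.sum
  apply List.map_congr_left
  intro c _
  simp only [Function.comp]
  rw [getD_freq]

-- moduli 2..6 all divide 60, so the elimination depends on count only
-- through count % 60
lemma mod_of_mod60 (c b : Int) (h2 : 2 ≤ b) (h6 : b ≤ 6) :
    PySem.Int.mod c b = PySem.Int.mod (PySem.Int.mod c 60) b := by
  have hb : (0 : Int) < b := by omega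
  have hdvd : b ∣ 60 := by interval_cases b <;> decide
  rw [PySem.Int.mod_eq_emod_of_pos hb, PySem.Int.mod_eq_emod_of_pos hb,
      PySem.Int.mod_eq_emod_of_pos (by norm_num : (0:Int) < 60),
      Int.emod_emod_of_dvd c hdvd]

lemma mod_pred_of_mod60 (c b : Int) (h2 : 2 ≤ b) (h6 : b ≤ 6) :
    PySem.Int.mod (c - 1) b = PySem.Int.mod (PySem.Int.mod c 60 - 1) b := by
  have hb : (0 : Int) < b := by omega
  rw [PySem.Int.mod_eq_emod_of_pos hb, PySem.Int.mod_eq_emod_of_pos hb,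
      PySem.Int.mod_eq_emod_of_pos (by norm_num : (0:Int) < 60)]
  have hdvd : b ∣ 60 := by interval_cases b <;> decide
  rw [Int.sub_emod (c % 60) 1 b, Int.emod_emod_of_dvd c hdvd, ← Int.sub_emod]

-- A's elimination loop only consults count % len for 2 ≤ len ≤ 6
lemma elimGo_congr (c c' : Int)
    (h : ∀ b : Int, 2 ≤ b → b ≤ 6 → PySem.Int.mod c b = PySem.Int.mod c' b) :
    ∀ fuel (seq : List Char), seq.length ≤ 6 →
      flamesElimGo c fuel seq = flamesElimGo c' fuel seq := by
  intro fuel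
  induction fuel with
  | zero => intro seq _; rfl
  | succ n ih =>
    intro seq hlen
    simp only [flamesElimGo]
    by_cases h1 : 1 < seq.length
    · rw [if_pos h1, if_pos h1]
      have hb := h (seq.length : Int) (by exact_mod_cast h1) (by exact_mod_cast hlen)
      rw [hb]
      by_cases h0 : 0 ≤ PySem.Int.mod c' (seq.length : Int) - 1
      · rw [if_pos h0, if_pos h0]
        apply ih
        simp only [List.length_append, List.length_take, List.length_drop]
        omega
      · rw [if_neg h0, if_neg h0]
        apply ih
        simp only [List.length_take]
        omega
    · rw [if_neg h1, if_neg h1]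

-- B's index recurrence only consults (count - 1) % n for n in range(2, 7)
lemma foldIdx_congr (c c' : Int)
    (h : ∀ b : Int, 2 ≤ b → b ≤ 6 →
      PySem.Int.mod (c - 1) b = PySem.Int.mod (c' - 1) b) :
    (PySem.List.pyRange 2 7 1).foldl
        (fun idx n => if PySem.Int.mod (c - 1) n ≤ idx then idx + 1 else idx) 0
      = (PySem.List.pyRange 2 7 1).foldl
        (fun idx n => if PySem.Int.mod (c' - 1) n ≤ idx then idx + 1 else idx) 0 := by
  have hr : PySem.List.pyRange 2 7 1 = [2, 3, 4, 5, 6] := by decide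
  rw [hr]
  simp only [List.foldl_cons, List.foldl_nil]
  rw [h 2 (by norm_num) (by norm_num), h 3 (by norm_num) (by norm_num),
      h 4 (by norm_num) (by norm_num), h 5 (by norm_num) (by norm_num),
      h 6 (by norm_num) (by norm_num)]

-- the elimination survivor's status equals the recurrence's tuple entry
lemma tail_eq (c : Int) :
    PySem.Dict.getD statusMap
        (String.mk (flamesElim c ['f', 'l', 'a', 'm', 'e', 's'])) ""
      = (PySem.List.pyGet?
          ["Friendship", "Love", "Affection", "Marriage", "Enemy", "Sibling"]
          ((PySem.List.pyRange 2 7 1).foldl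
            (fun idx n => if PySem.Int.mod (c - 1) n ≤ idx then idx + 1 else idx)
            0)).getD "" := by
  have hA : flamesElim c ['f', 'l', 'a', 'm', 'e', 's']
      = flamesElim (PySem.Int.mod c 60) ['f', 'l', 'a', 'm', 'e', 's'] := by
    unfold flamesElim
    exact elimGo_congr c (PySem.Int.mod c 60)
      (fun b h2 h6 => mod_of_mod60 c b h2 h6) _ _ (by norm_num)
  have hB := foldIdx_congr c (PySem.Int.mod c 60)
      (fun b h2 h6 => mod_pred_of_mod60 c b h2 h6)
  rw [hA, hB]
  have h0 : 0 ≤ PySem.Int.mod c 60 := PySem.Int.mod_nonneg c (by norm_num)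
  have h60 : PySem.Int.mod c 60 < 60 := PySem.Int.mod_lt c (by norm_num)
  set r := PySem.Int.mod c 60 with hrdef
  clear_value r
  interval_cases r <;> decide

-- ===== VERDICT (by name: the statement is the Claim_ definition above) =====
theorem flames_spec : Claim_equal_flames := by
  intro name1 name2 _
  unfold Spec_flames flames flames_alt
  dsimp only
  have hfold :
      (fun (st : List Char × List Char) ch =>
        if PySem.Chars.isIn [ch] st.2 then (st.1.erase ch, st.2.erase ch) else st)
      = cancelStep := rfl
  rw [hfold]
  set s1 := PySem.Chars.replace (PySem.Chars.lower name1.toList) [' '] [] with hs1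
  set s2 := PySem.Chars.replace (PySem.Chars.lower name2.toList) [' '] [] with hs2
  rw [counts_eq s1 s2, ← countB_eq s1 s2]
  exact tail_eq _
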